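-- pv_equiv track=rewrite | github.com/Sushantkat/Assignment-2-Software-Now- | q2chap2.py | separate_and_convert
-- ===== SOURCE A (Python) =====
-- def separate_and_convert(s):
--     # Separating into number and letter substrings
--     number_substring = ''.join(c for c in s if c.isdigit())
--     letter_substring = ''.join(c for c in s if c.isalpha())
--
--     # Converting even numbers in the number substring to ASCII Code Decimal values
--     even_numbers = [int(n) for n in number_substring if int(n) % 2 == 0]
--     even_numbers_ascii = [ord(str(num)) for num in even_numbers]
--
--     # Converting upper-case letters in the letter substring to ASCII Code Decimal values
--     upper_case_letters = [c for c in letter_substring if c.isupper()]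
--     upper_case_letters_ascii = [ord(letter) for letter in upper_case_letters]
--
--     return ''.join(map(str, even_numbers)), even_numbers_ascii, ''.join(upper_case_letters), upper_case_letters_ascii
-- ===== SOURCE B (Python) =====
-- def separate_and_convert(s):
--     even_digits = []
--     even_ascii = []
--     upper_letters = []
--     upper_ascii = []
--     for c in s:
--         if c.isdigit():
--             v = int(c)
--             if v % 2 == 0:
--                 even_digits.append(c)
--                 even_ascii.append(ord(c))
--         elif c.isalpha() and c.isupper():
--             upper_letters.append(c)
--             upper_ascii.append(ord(c))
--     return ''.join(even_digits), even_ascii, ''.join(upper_letters), upper_ascii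
-- ===== Notes on version B (the rewrite author's own statement) =====
-- stated objective: faster
-- what changed: One pass over s maintaining four accumulators replaces the four chained comprehension passes, and the even digits and their ASCII codes are taken directly from the character instead of the int->str->ord round-trip.
import Mathlib
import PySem

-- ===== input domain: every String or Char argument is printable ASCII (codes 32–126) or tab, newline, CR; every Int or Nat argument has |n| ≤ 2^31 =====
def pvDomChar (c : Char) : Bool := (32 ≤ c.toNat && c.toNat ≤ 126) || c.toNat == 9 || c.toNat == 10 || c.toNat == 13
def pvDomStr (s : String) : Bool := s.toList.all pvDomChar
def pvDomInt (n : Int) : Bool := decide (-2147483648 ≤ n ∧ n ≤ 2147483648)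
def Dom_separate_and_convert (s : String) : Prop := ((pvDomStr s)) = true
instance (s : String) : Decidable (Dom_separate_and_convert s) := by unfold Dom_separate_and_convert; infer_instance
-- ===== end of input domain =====

-- B replaces A's four chained comprehension passes by one loop with four accumulators,
-- reading the even digits and their codes directly from the character (objective: faster, measured).

-- ===== PORT A =====
-- int(n) for a single character; the default is unreachable in A since n is an ASCII digit
-- (filtered by isdigit), where int() always parses.
def pyInt_digit (c : Char) : Int := (PySem.Int.ofStr? (String.mk [c])).getD 0
-- ord(t) for the one-character strings str(num) produces here (num is a digit 0–9); exact there.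
def pyOrd1 (t : String) : Int := ((t.toList.headD ' ').toNat : Int)

def separate_and_convert (s : String) : String × List Int × String × List Int :=
  let number_substring : List Char := s.toList.filter (fun c => PySem.Chars.isdigit c)
  let letter_substring : List Char := s.toList.filter (fun c => PySem.Chars.isalpha c)
  let even_numbers : List Int :=
    (number_substring.filter (fun n => PySem.Int.mod (pyInt_digit n) 2 == 0)).map pyInt_digit
  let even_numbers_ascii : List Int := even_numbers.map (fun num => pyOrd1 (PySem.Int.toStr num))
  let upper_case_letters : List Char := letter_substring.filter (fun c => PySem.Chars.isupper c)
  let upper_case_letters_ascii : List Int := upper_case_letters.map (fun c => (c.toNat : Int))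
  ( String.mk ((even_numbers.map (fun n => (PySem.Int.toStr n).toList)).flatten),
    even_numbers_ascii,
    String.mk upper_case_letters,
    upper_case_letters_ascii )

-- ===== PORT B =====
def altStep (acc : List Char × List Int × List Char × List Int) (c : Char) :
    List Char × List Int × List Char × List Int :=
  let (ed, ea, ul, ua) := acc
  if PySem.Chars.isdigit c then
    let v := pyInt_digit c
    if PySem.Int.mod v 2 == 0 then (ed ++ [c], ea ++ [(c.toNat : Int)], ul, ua)
    else (ed, ea, ul, ua)
  else if PySem.Chars.isalpha c && PySem.Chars.isupper c then
    (ed, ea, ul ++ [c], ua ++ [(c.toNat : Int)])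
  else (ed, ea, ul, ua)

def separate_and_convert_alt (s : String) : String × List Int × String × List Int :=
  let r := s.toList.foldl altStep ([], [], [], [])
  (String.mk r.1, r.2.1, String.mk r.2.2.1, r.2.2.2)

-- ===== PRECONDITION & SPEC =====
def Spec_separate_and_convert (s : String) (out : String × List Int × String × List Int) : Prop := out = separate_and_convert_alt s
instance (s : String) (out : String × List Int × String × List Int) : Decidable (Spec_separate_and_convert s out) := by unfold Spec_separate_and_convert; infer_instance

-- ===== CLAIM (what is proved, stated in full; the proofs are below) =====
def Claim_equal_separate_and_convert : Prop := ∀ (s : String), Dom_separate_and_convert s → Spec_separate_and_convert s (separate_and_convert s)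

-- ===== LEMMAS AND PROOFS =====

theorem char_eq_iff_toNat (c d : Char) : c = d ↔ c.toNat = d.toNat :=
  ⟨fun h => by rw [h], fun h => Char.ext (UInt32.toNat_inj.mp h)⟩

theorem digit_mem (c : Char) (h : PySem.Chars.isdigit c = true) :
    c ∈ ['0','1','2','3','4','5','6','7','8','9'] := by
  simp only [PySem.Chars.isdigit, Bool.and_eq_true, decide_eq_true_eq, Char.le_def,
    UInt32.le_iff_toNat_le] at h
  have h1 : 48 ≤ c.toNat := h.1
  have h2 : c.toNat ≤ 57 := h.2
  simp only [List.mem_cons, List.not_mem_nil, or_false, char_eq_iff_toNat,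
    show ('0':Char).toNat = 48 from rfl, show ('1':Char).toNat = 49 from rfl,
    show ('2':Char).toNat = 50 from rfl, show ('3':Char).toNat = 51 from rfl,
    show ('4':Char).toNat = 52 from rfl, show ('5':Char).toNat = 53 from rfl,
    show ('6':Char).toNat = 54 from rfl, show ('7':Char).toNat = 55 from rfl,
    show ('8':Char).toNat = 56 from rfl, show ('9':Char).toNat = 57 from rfl]
  omega

theorem digit_toStr (c : Char) (h : PySem.Chars.isdigit c = true) :
    (PySem.Int.toStr (pyInt_digit c)).toList = [c] := by
  have := digit_mem c h
  fin_cases this <;> decide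

theorem digit_ord (c : Char) (h : PySem.Chars.isdigit c = true) :
    pyOrd1 (PySem.Int.toStr (pyInt_digit c)) = (c.toNat : Int) := by
  have := digit_mem c h
  fin_cases this <;> decide

theorem digit_not_alpha (c : Char) (h : PySem.Chars.isdigit c = true) :
    PySem.Chars.isalpha c = false := by
  simp only [PySem.Chars.isdigit, Bool.and_eq_true, decide_eq_true_eq, Char.le_def,
    UInt32.le_iff_toNat_le] at h
  have h1 : 48 ≤ c.toNat := h.1
  have h2 : c.toNat ≤ 57 := h.2
  simp only [PySem.Chars.isalpha, PySem.Chars.isupper, PySem.Chars.islower,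
    Bool.or_eq_false_iff, Bool.and_eq_false_iff, decide_eq_false_iff_not, not_le]
  constructor
  · left; show c.toNat < 65; omega
  · left; show c.toNat < 97; omega

-- The four streams B's loop accumulates, stated accumulator-free.
def edOf (l : List Char) : List Char :=
  l.filter (fun c => PySem.Chars.isdigit c && (PySem.Int.mod (pyInt_digit c) 2 == 0))
def ulOf (l : List Char) : List Char :=
  l.filter (fun c => PySem.Chars.isalpha c && PySem.Chars.isupper c)

theorem foldl_altStep (l : List Char) :
    ∀ ed ea ul ua, l.foldl altStep (ed, ea, ul, ua) =
      (ed ++ edOf l, ea ++ (edOf l).map (fun c => (c.toNat : Int)),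
       ul ++ ulOf l, ua ++ (ulOf l).map (fun c => (c.toNat : Int))) := by
  induction l with
  | nil => intro ed ea ul ua; simp [edOf, ulOf]
  | cons c t ih =>
    intro ed ea ul ua
    simp only [List.foldl_cons, altStep]
    by_cases hd : PySem.Chars.isdigit c = true
    · have ha : PySem.Chars.isalpha c = false := digit_not_alpha c hd
      by_cases hdvd : (2 : Int) ∣ pyInt_digit c
      · simp [hd, ha, hdvd, edOf, ulOf, ih, List.append_assoc]
      · simp [hd, ha, hdvd, edOf, ulOf, ih]
    · have hd' : PySem.Chars.isdigit c = false := by simpa using hd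
      by_cases ha : PySem.Chars.isalpha c = true
      · by_cases hup : PySem.Chars.isupper c = true
        · simp [hd', ha, hup, edOf, ulOf, ih, List.append_assoc]
        · simp [hd', ha, hup, edOf, ulOf, ih]
      · have ha' : PySem.Chars.isalpha c = false := by simpa using ha
        simp [hd', ha', edOf, ulOf, ih]

theorem flatten_toStr_of_digits (l : List Char)
    (h : ∀ c ∈ l, PySem.Chars.isdigit c = true) :
    ((l.map pyInt_digit).map (fun n => (PySem.Int.toStr n).toList)).flatten = l := by
  induction l with
  | nil => simp
  | cons c t ih =>
    simp only [List.map_cons, List.flatten_cons,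
      digit_toStr c (h c (List.mem_cons_self)), List.cons_append, List.nil_append]
    exact congrArg (c :: ·) (ih fun x hx => h x (List.mem_cons_of_mem _ hx))

theorem map_ord_toStr_of_digits (l : List Char)
    (h : ∀ c ∈ l, PySem.Chars.isdigit c = true) :
    ((l.map pyInt_digit).map (fun num => pyOrd1 (PySem.Int.toStr num))) =
      l.map (fun c => (c.toNat : Int)) := by
  induction l with
  | nil => simp
  | cons c t ih =>
    simp only [List.map_cons, digit_ord c (h c (List.mem_cons_self))]
    exact congrArg _ (ih fun x hx => h x (List.mem_cons_of_mem _ hx))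

theorem numberFilter_eq_edOf (l : List Char) :
    (l.filter (fun c => PySem.Chars.isdigit c)).filter
        (fun n => PySem.Int.mod (pyInt_digit n) 2 == 0) = edOf l := by
  rw [List.filter_filter]
  exact List.filter_congr fun a _ => by rw [Bool.and_comm]

theorem letterFilter_eq_ulOf (l : List Char) :
    (l.filter (fun c => PySem.Chars.isalpha c)).filter
        (fun c => PySem.Chars.isupper c) = ulOf l := by
  rw [List.filter_filter]
  exact List.filter_congr fun a _ => by rw [Bool.and_comm]

theorem edOf_digits (l : List Char) : ∀ c ∈ edOf l, PySem.Chars.isdigit c = true := by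
  intro c hc
  have := List.of_mem_filter hc
  exact (Bool.and_eq_true _ _ ▸ this).1

-- ===== VERDICT (by name: the statement is the Claim_ definition above) =====
theorem separate_and_convert_spec : Claim_equal_separate_and_convert := by
  intro s _
  unfold Spec_separate_and_convert separate_and_convert separate_and_convert_alt
  rw [foldl_altStep]
  simp only [List.nil_append]
  rw [numberFilter_eq_edOf, letterFilter_eq_ulOf]
  refine Prod.ext ?_ (Prod.ext ?_ (Prod.ext ?_ ?_))
  · exact congrArg String.mk (flatten_toStr_of_digits _ (edOf_digits s.toList))
  · exact map_ord_toStr_of_digits _ (edOf_digits s.toList)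
  · rfl
  · rfl
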